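-- pv_equiv track=rewrite | github.com/Arjun3125/Era | persona/validation/identity_validator.py | _find_contradiction
-- ===== SOURCE A (Python) =====
-- from typing import Dict, List, Optional, Tuple
--
-- def _find_contradiction(new_claims: List[str], past_claims: List[str]) -> Optional[str]:
--     """Find if any new claim contradicts past claim."""
--     for new in new_claims:
--         for past in past_claims:
--             # Check for "never" vs "always" patterns
--             if "never" in past.lower() and "always" in new.lower():
--                 return f"Claimed 'never' but now saying 'always'"
--             if "never" in new.lower() and "always" in past.lower():
--                 return f"Claimed 'always' but now saying 'never'"
--     return None
-- ===== SOURCE B (Python) =====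
-- from typing import List, Optional
--
-- _MSG_NA = "Claimed 'never' but now saying 'always'"
-- _MSG_AN = "Claimed 'always' but now saying 'never'"
--
--
-- def _find_contradiction(new_claims: List[str], past_claims: List[str]) -> Optional[str]:
--     """Find if any new claim contradicts past claim.
--
--     One pass over past_claims to locate the first 'never' and first 'always'
--     past claims, then one pass over new_claims; the earlier past index decides
--     which message fires (ties go to the 'never'-in-past check).
--     """
--     i_never = next((i for i, p in enumerate(past_claims) if "never" in p.lower()), None)
--     i_always = next((i for i, p in enumerate(past_claims) if "always" in p.lower()), None)
--     for new in new_claims: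
--         nl = new.lower()
--         c1 = i_never if "always" in nl else None
--         c2 = i_always if "never" in nl else None
--         if c1 is not None:
--             if c2 is None or c1 <= c2:
--                 return _MSG_NA
--             return _MSG_AN
--         if c2 is not None:
--             return _MSG_AN
--     return None
-- ===== Notes on version B (the rewrite author's own statement) =====
-- stated objective: faster
-- what changed: Replaced A's nested scan over all (new, past) pairs by precomputing the first past index containing 'never' and the first containing 'always', then a single pass over new_claims choosing the message by the smaller triggering index (ties to the 'never'-in-past check, matching A's branch order).
import Mathlib
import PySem

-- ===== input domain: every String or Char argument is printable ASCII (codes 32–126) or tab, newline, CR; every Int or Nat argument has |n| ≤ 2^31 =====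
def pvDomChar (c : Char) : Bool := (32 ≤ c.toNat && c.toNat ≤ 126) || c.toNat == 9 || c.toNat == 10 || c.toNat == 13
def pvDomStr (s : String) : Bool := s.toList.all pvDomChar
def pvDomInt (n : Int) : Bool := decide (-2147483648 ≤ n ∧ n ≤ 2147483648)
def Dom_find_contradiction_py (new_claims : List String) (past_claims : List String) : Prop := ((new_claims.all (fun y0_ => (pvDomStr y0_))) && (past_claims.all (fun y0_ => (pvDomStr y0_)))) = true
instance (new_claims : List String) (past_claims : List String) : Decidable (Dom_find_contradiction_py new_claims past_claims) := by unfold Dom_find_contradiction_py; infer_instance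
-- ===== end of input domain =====

-- B replaces A's nested O(n*m) scan by precomputing the first 'never'/'always' past indices
-- and making one pass over the new claims (objective: faster, asymptotic).

-- ===== PORT A =====
-- inner loop of A: 'for past in past_claims: …' for a fixed new claim
def pvInnerA (new : String) : List String → Option String
  | [] => none
  | past :: rest =>
    if PySem.Str.isIn "never" (PySem.Str.lower past) && PySem.Str.isIn "always" (PySem.Str.lower new) then
      some "Claimed 'never' but now saying 'always'"
    else if PySem.Str.isIn "never" (PySem.Str.lower new) && PySem.Str.isIn "always" (PySem.Str.lower past) then
      some "Claimed 'always' but now saying 'never'"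
    else pvInnerA new rest

def find_contradiction_py (new_claims : List String) (past_claims : List String) : Option String :=
  match new_claims with
  | [] => none
  | new :: rest =>
    match pvInnerA new past_claims with
    | some r => some r
    | none => find_contradiction_py rest past_claims

-- ===== PORT B =====
-- next((i for i, p in enumerate(past_claims) if needle in p.lower()), None)
def pvFirstIdx (needle : String) : List String → Option Nat
  | [] => none
  | p :: rest =>
    if PySem.Str.isIn needle (PySem.Str.lower p) then some 0
    else (pvFirstIdx needle rest).map (· + 1)

-- the 'for new in new_claims' loop of B, with the two precomputed indices
def pvAltLoop (iNever iAlways : Option Nat) : List String → Option String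
  | [] => none
  | new :: rest =>
    let nl := PySem.Str.lower new
    let c1 := if PySem.Str.isIn "always" nl then iNever else none
    let c2 := if PySem.Str.isIn "never" nl then iAlways else none
    match c1, c2 with
    | some i, some j =>
      if i ≤ j then some "Claimed 'never' but now saying 'always'"
      else some "Claimed 'always' but now saying 'never'"
    | some _, none => some "Claimed 'never' but now saying 'always'"
    | none, some _ => some "Claimed 'always' but now saying 'never'"
    | none, none => pvAltLoop iNever iAlways rest

def find_contradiction_py_alt (new_claims : List String) (past_claims : List String) : Option String :=
  pvAltLoop (pvFirstIdx "never" past_claims) (pvFirstIdx "always" past_claims) new_claims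

-- ===== PRECONDITION & SPEC =====
def Spec_find_contradiction_py (new_claims : List String) (past_claims : List String) (out : Option String) : Prop := out = find_contradiction_py_alt new_claims past_claims
instance (new_claims : List String) (past_claims : List String) (out : Option String) : Decidable (Spec_find_contradiction_py new_claims past_claims out) := by unfold Spec_find_contradiction_py; infer_instance

-- ===== CLAIM (what is proved, stated in full; the proofs are below) =====
def Claim_equal_find_contradiction_py : Prop := ∀ (new_claims : List String) (past_claims : List String), Dom_find_contradiction_py new_claims past_claims → Spec_find_contradiction_py new_claims past_claims (find_contradiction_py new_claims past_claims)

-- ===== LEMMAS AND PROOFS =====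

-- what one iteration of B's loop decides, as a function of the two indices and the new claim's flags
def pvRes (iNever iAlways : Option Nat) (hasA hasN : Bool) : Option String :=
  match (if hasA then iNever else none), (if hasN then iAlways else none) with
  | some i, some j =>
    if i ≤ j then some "Claimed 'never' but now saying 'always'"
    else some "Claimed 'always' but now saying 'never'"
  | some _, none => some "Claimed 'never' but now saying 'always'"
  | none, some _ => some "Claimed 'always' but now saying 'never'"
  | none, none => none

lemma pvAltLoop_cons (iN iA : Option Nat) (new : String) (rest : List String) :
    pvAltLoop iN iA (new :: rest) =
      match pvRes iN iA (PySem.Str.isIn "always" (PySem.Str.lower new))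
          (PySem.Str.isIn "never" (PySem.Str.lower new)) with
      | some r => some r
      | none => pvAltLoop iN iA rest := by
  simp only [pvAltLoop, pvRes]
  rcases h1 : (if PySem.Str.isIn "always" (PySem.Str.lower new) then iN else none) with _ | i <;>
    rcases h2 : (if PySem.Str.isIn "never" (PySem.Str.lower new) then iA else none) with _ | j <;>
    simp <;> split <;> rfl

-- pvRes is invariant under shifting both indices by one
lemma pvRes_map_succ (iN iA : Option Nat) (hasA hasN : Bool) :
    pvRes (iN.map (· + 1)) (iA.map (· + 1)) hasA hasN = pvRes iN iA hasA hasN := by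
  cases iN <;> cases iA <;> cases hasA <;> cases hasN <;>
    simp [pvRes] <;> split <;> split <;> omega

-- A's inner scan equals B's per-claim decision
lemma pvInnerA_eq (new : String) (past : List String) :
    pvInnerA new past = pvRes (pvFirstIdx "never" past) (pvFirstIdx "always" past)
      (PySem.Str.isIn "always" (PySem.Str.lower new))
      (PySem.Str.isIn "never" (PySem.Str.lower new)) := by
  induction past with
  | nil => simp [pvInnerA, pvFirstIdx, pvRes]
  | cons p rest ih =>
    simp only [pvInnerA, pvFirstIdx, ih]
    rcases hpn : PySem.Str.isIn "never" (PySem.Str.lower p) with _ | _ <;>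
      rcases hpa : PySem.Str.isIn "always" (PySem.Str.lower p) with _ | _ <;>
      rcases hna : PySem.Str.isIn "always" (PySem.Str.lower new) with _ | _ <;>
      rcases hnn : PySem.Str.isIn "never" (PySem.Str.lower new) with _ | _ <;>
      simp [pvRes, pvRes_map_succ] <;>
      (try cases pvFirstIdx "never" rest) <;>
      (try cases pvFirstIdx "always" rest) <;>
      simp [pvRes]

lemma pvMain (new_claims past_claims : List String) :
    find_contradiction_py new_claims past_claims
      = find_contradiction_py_alt new_claims past_claims := by
  induction new_claims with
  | nil => rfl
  | cons new rest ih =>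
    simp only [find_contradiction_py, find_contradiction_py_alt, pvAltLoop_cons,
      pvInnerA_eq, ih, find_contradiction_py_alt]

-- ===== VERDICT (by name: the statement is the Claim_ definition above) =====
theorem find_contradiction_py_spec : Claim_equal_find_contradiction_py := by
  intro new_claims past_claims _
  exact pvMain new_claims past_claims
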